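-- pv_equiv track=rewrite | github.com/m-spr/RCEHDC | OTFGEN_Python/mnistWithSparsity.py | memMinimizer
-- ===== SOURCE A (Python) =====
-- import math
--
-- def memMinimizer (d, f):
--     n = 2
--     k = []
--     zeros = []
--     memSize = []
--     popCountSize = []
--     memOverhead = []
--     while 2**n < f:
--         k.append(math.ceil(d/(2**n)))
--         zeros.append((k[-1]*(2**n))-d)
--         memSize.append(n)
--         popCountSize.append((k[-1]*n))
--         memOverhead.append(zeros[-1]+popCountSize[-1])
--         n = n + 1
--     return memSize[memOverhead.index(min(memOverhead))], k[memOverhead.index(min(memOverhead))]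
-- ===== SOURCE B (Python) =====
-- def memMinimizer(d, f):
--     # Single pass with a running minimum instead of five parallel lists + min/index.
--     best = None  # (overhead, n, k) with the smallest overhead seen, earliest n wins ties
--     n = 2
--     while 2 ** n < f:
--         k = -(-d // (2 ** n))  # ceil(d / 2**n), exact integer arithmetic
--         overhead = k * (2 ** n) - d + k * n
--         if best is None or overhead < best[0]:
--             best = (overhead, n, k)
--         n += 1
--     if best is None:
--         raise ValueError("memMinimizer: no memory size candidates (f <= 4)")
--     return best[1], best[2]
-- ===== Notes on version B (the rewrite author's own statement) =====
-- stated objective: simpler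
-- what changed: Replaces the five parallel lists plus min()/index() post-processing with a single running-minimum (overhead, n, k) triple updated only on a strict improvement, preserving first-minimum tie behaviour; no lists are built.
import Mathlib
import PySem

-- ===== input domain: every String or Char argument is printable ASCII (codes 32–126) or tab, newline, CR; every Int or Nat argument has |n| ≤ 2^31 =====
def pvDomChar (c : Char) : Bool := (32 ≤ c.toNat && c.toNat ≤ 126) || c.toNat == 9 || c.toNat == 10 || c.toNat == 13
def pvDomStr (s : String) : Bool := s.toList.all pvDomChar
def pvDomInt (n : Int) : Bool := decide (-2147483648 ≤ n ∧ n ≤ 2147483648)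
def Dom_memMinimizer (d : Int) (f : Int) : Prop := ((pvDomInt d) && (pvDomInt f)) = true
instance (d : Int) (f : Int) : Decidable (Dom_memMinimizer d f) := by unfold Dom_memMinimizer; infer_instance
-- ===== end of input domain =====

-- B replaces A's five parallel lists + min()/index() with a single running-minimum triple (simpler, O(1) space).

-- ===== PORT A =====
-- the while loop of A, generating the five lists (k, zeros, memSize, popCountSize, memOverhead) from n onward
-- math.ceil(d/(2**n)) is ported as exact ceiling division -((-d) // 2^n): on Dom (|d| ≤ 2^31, 2^n ≥ 4)
-- the float division d/2**n is exact, so math.ceil of it equals the integer ceiling.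
def loopA (d f : Int) (n : Nat) : List Int × List Int × List Int × List Int × List Int :=
  if h : (2:Int)^n < f then
    let kk : Int := -(PySem.Int.floordiv (-d) ((2:Int)^n))
    let rest := loopA d f (n+1)
    (kk :: rest.1,
     (kk * (2:Int)^n - d) :: rest.2.1,
     (n:Int) :: rest.2.2.1,
     (kk * (n:Int)) :: rest.2.2.2.1,
     ((kk * (2:Int)^n - d) + kk * (n:Int)) :: rest.2.2.2.2)
  else ([], [], [], [], [])
termination_by (f - (2:Int)^n).toNat
decreasing_by
  have h1 : (1:Int) ≤ (2:Int)^n := one_le_pow₀ (by norm_num)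
  have h2 : (2:Int)^(n+1) = 2 * (2:Int)^n := by ring
  omega

def memMinimizer (d : Int) (f : Int) : Int × Int :=
  let r := loopA d f 2
  -- Python: memSize[memOverhead.index(min(memOverhead))], k[memOverhead.index(min(memOverhead))]
  -- min([]) raises ValueError (f ≤ 4): excluded by Pre_memMinimizer; (0,0) is the junk value there.
  match PySem.List.min? r.2.2.2.2 (fun x => x) with
  | none => (0, 0)
  | some m =>
    match PySem.List.index? r.2.2.2.2 m with
    | none => (0, 0)
    | some i =>
      ((PySem.List.pyGet? r.2.2.1 (i:Int)).getD 0, (PySem.List.pyGet? r.1 (i:Int)).getD 0)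

-- ===== PORT B =====
-- the while loop of B, carrying the running best (overhead, n, k)
def loopB (d f : Int) (n : Nat) (best : Option (Int × Int × Int)) : Option (Int × Int × Int) :=
  if h : (2:Int)^n < f then
    let kk : Int := -(PySem.Int.floordiv (-d) ((2:Int)^n))
    let ov : Int := kk * (2:Int)^n - d + kk * (n:Int)
    let best' : Option (Int × Int × Int) :=
      match best with
      | none => some (ov, (n:Int), kk)
      | some b => if ov < b.1 then some (ov, (n:Int), kk) else some b
    loopB d f (n+1) best'
  else best
termination_by (f - (2:Int)^n).toNat
decreasing_by
  have h1 : (1:Int) ≤ (2:Int)^n := one_le_pow₀ (by norm_num)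
  have h2 : (2:Int)^(n+1) = 2 * (2:Int)^n := by ring
  omega

def memMinimizer_alt (d : Int) (f : Int) : Int × Int :=
  match loopB d f 2 none with
  | none => (0, 0)   -- B raises ValueError here (f ≤ 4): excluded by Pre_memMinimizer
  | some b => (b.2.1, b.2.2)

-- ===== PRECONDITION & SPEC =====
-- Pre_ excludes f ≤ 4, on which A's loop never runs and min([]) raises ValueError (B raises too).
def Pre_memMinimizer (d : Int) (f : Int) : Prop := 4 < f
instance (d : Int) (f : Int) : Decidable (Pre_memMinimizer d f) := by unfold Pre_memMinimizer; infer_instance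
def pvWitness_memMinimizer : Int × Int := (100, 100)

def Spec_memMinimizer (d : Int) (f : Int) (out : Int × Int) : Prop := out = memMinimizer_alt d f
instance (d : Int) (f : Int) (out : Int × Int) : Decidable (Spec_memMinimizer d f out) := by unfold Spec_memMinimizer; infer_instance

-- ===== CLAIM (what is proved, stated in full; the proofs are below) =====
def Claim_equal_memMinimizer : Prop := ∀ (d : Int) (f : Int), Dom_memMinimizer d f → Pre_memMinimizer d f → Spec_memMinimizer d f (memMinimizer d f)

-- ===== LEMMAS AND PROOFS =====

-- the list of (overhead, memSize, k) triples both loops traverse, from n onward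
def triples (d f : Int) (n : Nat) : List (Int × Int × Int) :=
  if h : (2:Int)^n < f then
    let kk : Int := -(PySem.Int.floordiv (-d) ((2:Int)^n))
    (kk * (2:Int)^n - d + kk * (n:Int), (n:Int), kk) :: triples d f (n+1)
  else []
termination_by (f - (2:Int)^n).toNat
decreasing_by
  have h1 : (1:Int) ≤ (2:Int)^n := one_le_pow₀ (by norm_num)
  have h2 : (2:Int)^(n+1) = 2 * (2:Int)^n := by ring
  omega

theorem triples_pos (d f : Int) (n : Nat) (h : (2:Int)^n < f) :
    triples d f n =
      (-(PySem.Int.floordiv (-d) ((2:Int)^n)) * (2:Int)^n - d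
         + -(PySem.Int.floordiv (-d) ((2:Int)^n)) * (n:Int), (n:Int),
       -(PySem.Int.floordiv (-d) ((2:Int)^n))) :: triples d f (n+1) := by
  rw [triples]; simp [h]

theorem triples_neg (d f : Int) (n : Nat) (h : ¬ (2:Int)^n < f) :
    triples d f n = [] := by
  rw [triples]; simp [h]

-- first element with minimal first component (later elements win only strictly)
def firstMin : List (Int × Int × Int) → Option (Int × Int × Int)
  | [] => none
  | t :: ts =>
    match firstMin ts with
    | none => some t
    | some u => some (if u.1 < t.1 then u else t)

theorem firstMin_none_iff (L : List (Int × Int × Int)) : firstMin L = none ↔ L = [] := by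
  cases L with
  | nil => simp [firstMin]
  | cons t ts =>
    simp only [firstMin]
    rcases firstMin ts <;> simp

theorem loopA_memSize (d f : Int) (n : Nat) :
    (loopA d f n).2.2.1 = (triples d f n).map (·.2.1) := by
  fun_induction loopA d f n with
  | case1 n h kk rest ih => rw [triples_pos d f n h]; simp only [List.map_cons]; rw [← ih]
  | case2 n h => rw [triples_neg d f n h]; simp [loopA]

theorem loopA_k (d f : Int) (n : Nat) :
    (loopA d f n).1 = (triples d f n).map (·.2.2) := by
  fun_induction loopA d f n with
  | case1 n h kk rest ih => rw [triples_pos d f n h]; simp only [List.map_cons]; rw [← ih]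
  | case2 n h => rw [triples_neg d f n h]; simp [loopA]

theorem loopA_mo (d f : Int) (n : Nat) :
    (loopA d f n).2.2.2.2 = (triples d f n).map (·.1) := by
  fun_induction loopA d f n with
  | case1 n h kk rest ih => rw [triples_pos d f n h]; simp only [List.map_cons]; rw [← ih]
  | case2 n h => rw [triples_neg d f n h]; simp [loopA]

def stepB (best : Option (Int × Int × Int)) (t : Int × Int × Int) : Option (Int × Int × Int) :=
  match best with
  | none => some t
  | some b => if t.1 < b.1 then some t else some b

theorem loopB_foldl (d f : Int) (n : Nat) (best : Option (Int × Int × Int)) :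
    loopB d f n best = List.foldl stepB best (triples d f n) := by
  fun_induction loopB d f n best with
  | case1 n best h kk ov best' ih =>
    have hb : stepB best (ov, (n:Nat), kk) = best' := by
      rcases best with _ | b <;> rfl
    rw [triples_pos d f n h, List.foldl_cons]
    show loopB d f (n+1) best' = List.foldl stepB (stepB best (ov, (n:Nat), kk)) (triples d f (n+1))
    rw [hb, ih]
  | case2 n best h => rw [triples_neg d f n h]; simp [loopB]

theorem firstMin_swap (b t : Int × Int × Int) (ts : List (Int × Int × Int)) :
    firstMin (b :: t :: ts) = firstMin ((if t.1 < b.1 then t else b) :: ts) := by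
  rcases hm : firstMin ts with _ | u <;>
    simp only [firstMin, hm] <;>
    split_ifs <;> first | rfl | (exfalso; omega)

theorem foldl_stepB_some (L : List (Int × Int × Int)) (b : Int × Int × Int) :
    List.foldl stepB (some b) L = firstMin (b :: L) := by
  induction L generalizing b with
  | nil => simp [firstMin]
  | cons t ts ih =>
    rw [List.foldl_cons]
    have hst : stepB (some b) t = some (if t.1 < b.1 then t else b) := by
      simp only [stepB]; split_ifs <;> rfl
    rw [hst, ih, ← firstMin_swap]

theorem foldl_stepB_none (t : Int × Int × Int) (ts : List (Int × Int × Int)) :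
    List.foldl stepB none (t :: ts) = firstMin (t :: ts) := by
  rw [List.foldl_cons]
  show List.foldl stepB (some t) ts = _
  exact foldl_stepB_some ts t

theorem firstMin_split (L : List (Int × Int × Int)) (u : Int × Int × Int)
    (h : firstMin L = some u) :
    ∃ pre suf, L = pre ++ u :: suf ∧ ∀ v ∈ pre, u.1 < v.1 := by
  induction L generalizing u with
  | nil => simp [firstMin] at h
  | cons t ts ih =>
    simp only [firstMin] at h
    rcases hm : firstMin ts with _ | u'
    · rw [hm] at h; simp at h
      exact ⟨[], ts, by simp [h], by simp⟩
    · rw [hm] at h; simp at h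
      by_cases hlt : u'.1 < t.1
      · rw [if_pos hlt] at h; subst h
        obtain ⟨pre, suf, hts, hpre⟩ := ih u' hm
        exact ⟨t :: pre, suf, by simp [hts], by
          intro v hv
          rcases List.mem_cons.mp hv with rfl | hv
          · exact hlt
          · exact hpre v hv⟩
      · rw [if_neg hlt] at h; subst h
        exact ⟨[], ts, by simp, by simp⟩

theorem firstMin_min (L : List (Int × Int × Int)) (u : Int × Int × Int)
    (h : firstMin L = some u) : u ∈ L ∧ ∀ v ∈ L, u.1 ≤ v.1 := by
  induction L generalizing u with
  | nil => simp [firstMin] at h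
  | cons t ts ih =>
    simp only [firstMin] at h
    rcases hm : firstMin ts with _ | u'
    · rw [hm] at h; simp at h; subst h
      have hts : ts = [] := (firstMin_none_iff ts).mp hm
      subst hts
      refine ⟨by simp, ?_⟩
      intro v hv; simp at hv; subst hv; exact le_refl _
    · rw [hm] at h; simp at h
      obtain ⟨hmem, hmin⟩ := ih u' hm
      by_cases hlt : u'.1 < t.1
      · rw [if_pos hlt] at h; subst h
        refine ⟨List.mem_cons_of_mem t hmem, ?_⟩
        intro v hv
        rcases List.mem_cons.mp hv with rfl | hv
        · omega
        · exact hmin v hv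
      · rw [if_neg hlt] at h; subst h
        refine ⟨List.mem_cons_self, ?_⟩
        intro v hv
        rcases List.mem_cons.mp hv with rfl | hv
        · omega
        · have := hmin v hv; omega

-- A's selection (min / index / get on the component lists) picks exactly firstMin
theorem selA (L : List (Int × Int × Int)) (u : Int × Int × Int)
    (h : firstMin L = some u) :
    PySem.List.min? (L.map (·.1)) (fun x => x) = some u.1 ∧
    ∃ i : Nat, PySem.List.index? (L.map (·.1)) u.1 = some i ∧
      (L.map (·.2.1))[i]? = some u.2.1 ∧ (L.map (·.2.2))[i]? = some u.2.2 := by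
  obtain ⟨hu_mem, hu_min⟩ := firstMin_min L u h
  obtain ⟨pre, suf, hL, hpre⟩ := firstMin_split L u h
  have hmem1 : u.1 ∈ L.map (·.1) := List.mem_map_of_mem hu_mem
  constructor
  · rcases hmin : PySem.List.min? (L.map (·.1)) (fun x => x) with _ | m
    · rw [PySem.List.min?_eq_none_iff] at hmin; simp_all
    · have hm_mem := PySem.List.min?_mem hmin
      have hm_min := PySem.List.min?_isMin hmin
      obtain ⟨v, hv, hveq⟩ := List.mem_map.mp hm_mem
      have h1 : m ≤ u.1 := hm_min u.1 hmem1
      have h2 : u.1 ≤ m := by rw [← hveq]; exact hu_min v hv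
      rw [hmin]; exact congrArg some (le_antisymm h1 h2)
  · refine ⟨pre.length, ?_, ?_, ?_⟩
    · rw [PySem.List.index?_eq_some_iff]
      refine ⟨pre.map (·.1), suf.map (·.1), by simp [hL], by simp, ?_⟩
      simp only [List.mem_map]
      rintro ⟨v, hv, hveq⟩
      have h1 : v.1 = u.1 := hveq
      have h2 := hpre v hv
      omega
    · rw [hL]; simp
    · rw [hL]; simp

theorem triples_ne_nil (d f : Int) (hf : 4 < f) : triples d f 2 ≠ [] := by
  have h4 : (2:Int)^2 < f := by norm_num; omega
  rw [triples_pos d f 2 h4]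
  simp

-- ===== VERDICT (by name: the statement is the Claim_ definition above) =====
theorem memMinimizer_spec : Claim_equal_memMinimizer := by
  unfold Claim_equal_memMinimizer
  intro d f _ hf
  unfold Spec_memMinimizer memMinimizer memMinimizer_alt
  have hne := triples_ne_nil d f hf
  rcases hT : triples d f 2 with _ | ⟨t, ts⟩
  · exact absurd hT hne
  rcases hu : firstMin (t :: ts) with _ | u
  · rw [firstMin_none_iff] at hu; simp at hu
  obtain ⟨hmin, i, hidx, hms, hk⟩ := selA (t :: ts) u hu
  rw [loopB_foldl, hT, foldl_stepB_none, hu]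
  simp only [loopA_mo, loopA_memSize, loopA_k, hT, hmin, hidx]
  simp only [PySem.List.pyGet?_natCast, List.map_cons]
  simp only [List.map_cons] at hms hk
  rw [hms, hk]
  rfl
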